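-- pv_equiv track=rewrite | github.com/dsoporan/numericalList | Undo.py | del_sep
-- ===== SOURCE A (Python) =====
-- def del_sep(l_back):
--     i = len(l_back) - 1
--     j = i
--     ok = 0
--     while i >= 0:
--         if l_back[i] == "sep":
--             ok = 1
--             break
--         i -= 1
--     k = j - i
--     while k >= 0 and len(l_back) != 0 and ok == 1:
--         l_back.pop()
--         k -= 1
--     return l_back
-- ===== SOURCE B (Python) =====
-- def del_sep(l_back):
--     last = -1
--     for idx, x in enumerate(l_back):
--         if x == "sep":
--             last = idx
--     if last != -1:
--         del l_back[last:]
--     return l_back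
-- ===== Notes on version B (the rewrite author's own statement) =====
-- stated objective: simpler
-- what changed: Replaces A's backward break-search for the last 'sep' plus a pop-counting while loop with one forward enumerate pass that records the last 'sep' index and a single slice deletion.
import Mathlib
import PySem

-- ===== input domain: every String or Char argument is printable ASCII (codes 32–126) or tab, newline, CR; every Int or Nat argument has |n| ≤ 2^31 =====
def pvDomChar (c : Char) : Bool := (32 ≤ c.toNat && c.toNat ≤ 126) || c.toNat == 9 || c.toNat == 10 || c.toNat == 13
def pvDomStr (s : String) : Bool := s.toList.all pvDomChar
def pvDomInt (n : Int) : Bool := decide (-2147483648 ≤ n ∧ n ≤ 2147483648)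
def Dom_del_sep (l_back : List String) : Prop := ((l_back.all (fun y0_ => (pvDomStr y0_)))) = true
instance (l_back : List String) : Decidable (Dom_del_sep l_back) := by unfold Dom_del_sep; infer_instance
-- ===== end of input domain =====

-- B replaces A's backward break-search plus pop-counting loop with one forward
-- enumerate pass recording the last 'sep' index and a single slice deletion (objective: simpler).
-- Python A and B mutate l_back in place (pop / del); the equivalence proved here is about the return value.

-- ===== PORT A =====
-- first while loop: scan i from len-1 downward, break with ok=1 at the last "sep"
def del_sep_find (l : List String) (i : Int) : Int × Int :=
  if h : i ≥ 0 then
    if PySem.List.pyGet? l i = some "sep" then (i, 1)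
    else del_sep_find l (i - 1)
  else (i, 0)
termination_by (i + 1).toNat
decreasing_by omega

-- second while loop: pop from the end while k ≥ 0 and the list is nonempty and ok == 1
def del_sep_pop (ok : Int) (l : List String) (k : Int) : List String :=
  if _h : k ≥ 0 ∧ l.length ≠ 0 ∧ ok = 1 then
    match hp : PySem.List.pop? l with
    | some (_, l') => del_sep_pop ok l' (k - 1)
    | none => l
  else l
termination_by l.length
decreasing_by
  have h2 := PySem.List.length_of_pop?_eq_some l hp
  simp only [] at h2
  omega

def del_sep (l_back : List String) : List String :=
  let i0 : Int := (l_back.length : Int) - 1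
  let j := i0
  let r := del_sep_find l_back i0
  let k := j - r.1
  del_sep_pop r.2 l_back k

-- ===== PORT B =====
def del_sep_alt (l_back : List String) : List String :=
  let last : Int := (PySem.List.enumerate l_back).foldl
    (fun acc p => if p.2 = "sep" then p.1 else acc) (-1)
  if last ≠ -1 then PySem.List.slice l_back none (some last) else l_back

-- ===== PRECONDITION & SPEC =====
def Spec_del_sep (l_back : List String) (out : List String) : Prop := out = del_sep_alt l_back
instance (l_back : List String) (out : List String) : Decidable (Spec_del_sep l_back out) := by unfold Spec_del_sep; infer_instance

-- ===== CLAIM (what is proved, stated in full; the proofs are below) =====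
def Claim_equal_del_sep : Prop := ∀ (l_back : List String), Dom_del_sep l_back → Spec_del_sep l_back (del_sep l_back)

-- ===== LEMMAS AND PROOFS =====

-- B's fold, with the start offset made explicit
def lastF (l : List String) (acc : Int) : Int :=
  (PySem.List.enumerate l).foldl (fun acc p => if p.2 = "sep" then p.1 else acc) acc

theorem enumerate_append (xs ys : List String) (s : Int) :
    PySem.List.enumerate (xs ++ ys) s =
      PySem.List.enumerate xs s ++ PySem.List.enumerate ys (s + xs.length) := by
  induction xs generalizing s with
  | nil => simp [PySem.List.enumerate_nil]
  | cons x xs ih =>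
      simp [PySem.List.enumerate_cons, ih]
      ring_nf

theorem lastF_append_singleton (xs : List String) (x : String) (acc : Int) :
    lastF (xs ++ [x]) acc =
      if x = "sep" then (xs.length : Int) else lastF xs acc := by
  unfold lastF
  rw [enumerate_append]
  simp [PySem.List.enumerate_cons, PySem.List.enumerate_nil, List.foldl_append]

-- A's search agrees on xs ++ [x] and on xs, for indices inside xs
theorem find_append (xs : List String) (x : String) :
    ∀ (m : Nat) (i : Int), (i + 1).toNat = m → i < (xs.length : Int) →
      del_sep_find (xs ++ [x]) i = del_sep_find xs i := by
  intro m
  induction m with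
  | zero =>
      intro i hm hlt
      have hneg : ¬ i ≥ 0 := by omega
      conv_lhs => rw [del_sep_find, dif_neg hneg]
      conv_rhs => rw [del_sep_find, dif_neg hneg]
  | succ n ih =>
      intro i hm hlt
      have hpos : i ≥ 0 := by omega
      have hidx : i.toNat < xs.length := by omega
      have hget : PySem.List.pyGet? (xs ++ [x]) i = PySem.List.pyGet? xs i := by
        rw [PySem.List.pyGet?_of_nonneg _ hpos, PySem.List.pyGet?_of_nonneg _ hpos,
          List.getElem?_append_left hidx]
      rw [del_sep_find, dif_pos hpos, hget]
      conv_rhs => rw [del_sep_find, dif_pos hpos]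
      split
      · rfl
      · exact ih (i - 1) (by omega) (by omega)

-- joint characterisation of A's backward search and B's forward fold
theorem find_lastF_char (l : List String) :
    ("sep" ∉ l ∧ del_sep_find l ((l.length : Int) - 1) = (-1, 0) ∧ lastF l (-1) = -1) ∨
    (∃ n : Nat, n < l.length ∧ del_sep_find l ((l.length : Int) - 1) = ((n : Int), 1) ∧
      lastF l (-1) = (n : Int) ∧ "sep" ∈ l) := by
  induction l using List.reverseRecOn with
  | nil =>
      left
      refine ⟨by simp, ?_, by simp [lastF, PySem.List.enumerate_nil]⟩
      rw [del_sep_find]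
      norm_num
  | append_singleton xs x ih =>
      have hlen : ((xs ++ [x]).length : Int) - 1 = (xs.length : Int) := by simp
      have hget : PySem.List.pyGet? (xs ++ [x]) (xs.length : Int) = some x :=
        PySem.List.pyGet?_append_length xs [] x
      by_cases hx : x = "sep"
      · right
        refine ⟨xs.length, by simp, ?_, ?_, by simp [hx]⟩
        · rw [hlen, del_sep_find, dif_pos (by positivity), hget, if_pos (by simp [hx])]
        · rw [lastF_append_singleton, if_pos hx]
      · have hstep : del_sep_find (xs ++ [x]) ((xs.length : Int)) =
            del_sep_find xs ((xs.length : Int) - 1) := by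
          rw [del_sep_find, dif_pos (by positivity), hget, if_neg (by simp [hx])]
          exact find_append xs x _ ((xs.length : Int) - 1) rfl (by omega)
        have hl : lastF (xs ++ [x]) (-1) = lastF xs (-1) := by
          rw [lastF_append_singleton, if_neg hx]
        rcases ih with ⟨hmem, hf, hlf⟩ | ⟨n, hn, hf, hlf, hmem⟩
        · left
          refine ⟨?_, ?_, ?_⟩
          · simp only [List.mem_append, List.mem_singleton, not_or]
            exact ⟨hmem, fun h => hx h.symm⟩
          · rw [hlen, hstep, hf]
          · rw [hl, hlf]
        · right
          exact ⟨n, by simp; omega, by rw [hlen, hstep, hf], by rw [hl, hlf], by simp [hmem]⟩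

-- A's pop loop with ok = 1 removes k+1 elements from the end
theorem pop_loop_take (k : Nat) :
    ∀ (l : List String), k < l.length →
      del_sep_pop 1 l (k : Int) = l.take (l.length - (k + 1)) := by
  induction k with
  | zero =>
      intro l hk
      have hne : l ≠ [] := by intro h; simp [h] at hk
      rcases List.eq_nil_or_concat l with rfl | ⟨ys, y, rfl⟩
      · exact absurd rfl hne
      rw [List.concat_eq_append]
      rw [del_sep_pop.eq_def, dif_pos (by simp)]
      rw [PySem.List.pop?_last]
      dsimp only
      rw [del_sep_pop.eq_def, dif_neg (by norm_num)]
      simp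
  | succ n ih =>
      intro l hk
      have hne : l ≠ [] := by intro h; simp [h] at hk
      rcases List.eq_nil_or_concat l with rfl | ⟨ys, y, rfl⟩
      · exact absurd rfl hne
      rw [List.concat_eq_append]
      rw [del_sep_pop.eq_def, dif_pos (by simp; positivity)]
      rw [PySem.List.pop?_last]
      dsimp only
      rw [show ((n.succ : Int)) - 1 = (n : Int) by push_cast; ring]
      rw [ih ys (by simp at hk; omega)]
      simp

-- with ok = 0 the pop loop does nothing
theorem pop_loop_zero (l : List String) (k : Int) : del_sep_pop 0 l k = l := by
  rw [del_sep_pop.eq_def, dif_neg (by simp)]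

-- ===== VERDICT (by name: the statement is the Claim_ definition above) =====
theorem del_sep_spec : Claim_equal_del_sep := by
  intro l _
  unfold Spec_del_sep
  simp only [del_sep, del_sep_alt]
  rcases find_lastF_char l with ⟨_, hf, hlf⟩ | ⟨n, hn, hf, hlf, _⟩
  · rw [hf]
    simp only [lastF] at hlf
    rw [hlf]
    simp [pop_loop_zero]
  · rw [hf]
    simp only [lastF] at hlf
    rw [hlf]
    have hk : ((l.length : Int) - 1 - (n : Int)) = ((l.length - 1 - n : Nat) : Int) := by
      omega
    rw [hk, pop_loop_take (l.length - 1 - n) l (by omega)]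
    rw [if_pos (by omega), PySem.List.slice_to l (by positivity)]
    congr 1
    omega
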